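-- pv_equiv track=rewrite | github.com/ambroisie/advent-of-code | 2025/d07/ex2/ex2.py | solve
-- ===== SOURCE A (Python) =====
-- import functools
-- from typing import NamedTuple
--
-- class Point(NamedTuple):
--     x: int
--     y: int
--
-- def solve(input: list[str]) -> int:
--     def parse(input: list[str]) -> tuple[Point, set[Point]]:
--         start: Point | None = None
--         splitters: set[Point] = set()
--         for x, line in enumerate(input):
--             for y, c in enumerate(line):
--                 pos = Point(x, y)
--                 if c == "S":
--                     start = pos
--                 elif c == "^":
--                     splitters.add(pos)
--         assert start is not None
--         return start, splitters
--
--     def count_timelines(start: Point, splitters: set[Point]) -> int: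
--         max_x = max(p.x for p in splitters)
--
--         @functools.cache
--         def rec(p: Point) -> int:
--             if p.x > max_x:
--                 return 1
--             if p not in splitters:
--                 return rec(Point(p.x + 1, p.y))
--             return rec(Point(p.x + 1, p.y - 1)) + rec(Point(p.x + 1, p.y + 1))
--
--         return rec(start)
--
--     start, splitters = parse(input)
--     return count_timelines(start, splitters)
-- ===== SOURCE B (Python) =====
-- def solve(input: list[str]) -> int:
--     starts = [
--         (x, y) for x, line in enumerate(input) for y, c in enumerate(line) if c == "S"
--     ]
--     splitters = {
--         (x, y) for x, line in enumerate(input) for y, c in enumerate(line) if c == "^"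
--     }
--     assert starts
--     start = starts[-1]
--     max_x = max(p[0] for p in splitters)
--     # forward level-by-level DP: counts of timelines per column at row x
--     counts = {start[1]: 1}
--     x = start[0]
--     while x <= max_x:
--         nxt: dict[int, int] = {}
--         for y, c in counts.items():
--             if (x, y) in splitters:
--                 nxt[y - 1] = nxt.get(y - 1, 0) + c
--                 nxt[y + 1] = nxt.get(y + 1, 0) + c
--             else:
--                 nxt[y] = nxt.get(y, 0) + c
--         counts = nxt
--         x += 1
--     return sum(counts.values())
-- ===== Notes on version B (the rewrite author's own statement) =====
-- stated objective: alternative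
-- what changed: Replaces the memoized point-by-point recursion with a forward level-by-level DP that keeps a dict of per-column timeline counts and propagates it one grid row at a time; parsing is done with comprehensions instead of an accumulating loop.
import Mathlib
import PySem

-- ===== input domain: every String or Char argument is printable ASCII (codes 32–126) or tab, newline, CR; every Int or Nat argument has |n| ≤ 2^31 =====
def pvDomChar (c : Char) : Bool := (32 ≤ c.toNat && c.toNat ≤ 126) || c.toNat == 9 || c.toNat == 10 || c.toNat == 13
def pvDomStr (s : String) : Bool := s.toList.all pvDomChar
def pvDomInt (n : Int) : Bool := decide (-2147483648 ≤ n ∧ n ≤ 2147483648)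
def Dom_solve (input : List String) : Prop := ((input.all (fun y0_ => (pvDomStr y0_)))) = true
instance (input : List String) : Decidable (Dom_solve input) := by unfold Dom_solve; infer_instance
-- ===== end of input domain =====

-- B replaces A's memoized recursion over points by a forward level-by-level DP over dicts of
-- per-column timeline counts (alternative decomposition; parsing by comprehensions instead of a fold).

-- ===== PORT A =====
-- A's recursion rec(p); ported with explicit fuel (maxX + 1 - p.x).toNat, which is exact:
-- along every call chain the fuel reaches 0 exactly when p.x > maxX, where Python's rec returns 1.
def recA (spl : PySem.Set (Int × Int)) (maxX : Int) : Nat → Int → Int → Int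
  | 0, _, _ => 1
  | f + 1, x, y =>
    if x > maxX then 1
    else if PySem.Set.contains spl (x, y) then
      recA spl maxX f (x + 1) (y - 1) + recA spl maxX f (x + 1) (y + 1)
    else recA spl maxX f (x + 1) y

def solve (input : List String) : Int :=
  let parsed := (PySem.List.enumerate input 0).foldl
    (fun (acc : Option (Int × Int) × PySem.Set (Int × Int)) xl =>
      (PySem.List.enumerate xl.2.toList 0).foldl
        (fun acc yc =>
          if yc.2 = 'S' then (some (xl.1, yc.1), acc.2)
          else if yc.2 = '^' then (acc.1, PySem.Set.add acc.2 (xl.1, yc.1))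
          else acc) acc)
    (none, PySem.Set.empty)
  match parsed.1 with
  | none => 0  -- assert start is not None: AssertionError, outside Pre_solve
  | some start =>
    match PySem.List.max? (parsed.2.map (fun p => p.1)) (fun v => v) with
    | none => 0  -- max() over the empty set of splitters: ValueError, outside Pre_solve
    | some maxX => recA parsed.2 maxX (maxX + 1 - start.1).toNat start.1 start.2

-- ===== PORT B =====
-- nxt[k] = nxt.get(k, 0) + c
def bump (d : PySem.Dict Int Int) (k c : Int) : PySem.Dict Int Int :=
  d.insert k (d.getD k 0 + c)

-- the body of B's while loop: propagate every column count one row down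
def stepRow (spl : PySem.Set (Int × Int)) (x : Int) (counts : PySem.Dict Int Int) :
    PySem.Dict Int Int :=
  counts.items.foldl
    (fun nxt yc =>
      if PySem.Set.contains spl (x, yc.1) then bump (bump nxt (yc.1 - 1) yc.2) (yc.1 + 1) yc.2
      else bump nxt yc.1 yc.2)
    PySem.Dict.empty

-- B's 'while x <= max_x' loop, with exact fuel (maxX + 1 - x).toNat
def loopB (spl : PySem.Set (Int × Int)) (maxX : Int) :
    Nat → Int → PySem.Dict Int Int → PySem.Dict Int Int
  | 0, _, d => d
  | f + 1, x, d => if x ≤ maxX then loopB spl maxX f (x + 1) (stepRow spl x d) else d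

def solve_alt (input : List String) : Int :=
  let starts := (PySem.List.enumerate input 0).flatMap (fun xl =>
    ((PySem.List.enumerate xl.2.toList 0).filter (fun yc => yc.2 = 'S')).map
      (fun yc => (xl.1, yc.1)))
  let splitters : PySem.Set (Int × Int) :=
    PySem.Set.ofList ((PySem.List.enumerate input 0).flatMap (fun xl =>
      ((PySem.List.enumerate xl.2.toList 0).filter (fun yc => yc.2 = '^')).map
        (fun yc => (xl.1, yc.1))))
  match PySem.List.pyGet? starts (-1) with
  | none => 0  -- assert starts: AssertionError, outside Pre_solve
  | some start =>
    match PySem.List.max? (splitters.map (fun p => p.1)) (fun v => v) with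
    | none => 0  -- max() over the empty set of splitters: ValueError, outside Pre_solve
    | some maxX =>
      ((loopB splitters maxX (maxX + 1 - start.1).toNat start.1
          (PySem.Dict.empty.insert start.2 1)).values).sum

-- ===== PRECONDITION & SPEC =====
-- Pre_solve excludes exactly the grids on which A raises: no 'S' anywhere (AssertionError) or
-- no '^' anywhere (ValueError from max() of an empty sequence).
def Pre_solve (input : List String) : Prop :=
  (∃ s ∈ input, 'S' ∈ s.toList) ∧ (∃ s ∈ input, '^' ∈ s.toList)
instance (input : List String) : Decidable (Pre_solve input) := by unfold Pre_solve; infer_instance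

def pvWitness_solve : List String := ["S", "^"]

def Spec_solve (input : List String) (out : Int) : Prop := out = solve_alt input
instance (input : List String) (out : Int) : Decidable (Spec_solve input out) := by
  unfold Spec_solve; infer_instance

-- ===== CLAIM (what is proved, stated in full; the proofs are below) =====
def Claim_equal_solve : Prop :=
  ∀ (input : List String), Dom_solve input → Pre_solve input → Spec_solve input (solve input)

-- ===== LEMMAS AND PROOFS =====

-- proof-only helpers: the list of 'S' cells, the list of '^' cells, last-overwrite fold, weights
def lastOf {α : Type} (l : List α) (a : Option α) : Option α := l.foldl (fun _ x => some x) a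

def sList (x : Int) (M : List (Int × Char)) : List (Int × Int) :=
  (M.filter (fun yc => yc.2 = 'S')).map (fun yc => (x, yc.1))

def cList (x : Int) (M : List (Int × Char)) : List (Int × Int) :=
  (M.filter (fun yc => yc.2 = '^')).map (fun yc => (x, yc.1))

def startsAll (L : List (Int × String)) : List (Int × Int) :=
  L.flatMap (fun xl => sList xl.1 (PySem.List.enumerate xl.2.toList 0))

def capsAll (L : List (Int × String)) : List (Int × Int) :=
  L.flatMap (fun xl => cList xl.1 (PySem.List.enumerate xl.2.toList 0))

def W (l : List (Int × Int)) (g : Int → Int) : Int := (l.map (fun p => p.2 * g p.1)).sum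

theorem inner_parse (x : Int) (M : List (Int × Char))
    (a : Option (Int × Int) × PySem.Set (Int × Int)) :
    M.foldl (fun acc yc =>
        if yc.2 = 'S' then (some (x, yc.1), acc.2)
        else if yc.2 = '^' then (acc.1, PySem.Set.add acc.2 (x, yc.1))
        else acc) a
      = (lastOf (sList x M) a.1, PySem.Set.update a.2 (cList x M)) := by
  induction M generalizing a with
  | nil => simp [lastOf, sList, cList, PySem.Set.update]
  | cons yc M ih =>
    by_cases hS : yc.2 = 'S'
    · simp [hS, ih, sList, cList, lastOf, PySem.Set.update]
    · by_cases hC : yc.2 = '^'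
      · simp [hC, ih, sList, cList, lastOf, PySem.Set.update]
      · simp [hS, hC, ih, sList, cList, lastOf]

theorem outer_parse (L : List (Int × String)) (a : Option (Int × Int) × PySem.Set (Int × Int)) :
    L.foldl (fun acc xl =>
        (PySem.List.enumerate xl.2.toList 0).foldl (fun acc yc =>
          if yc.2 = 'S' then (some (xl.1, yc.1), acc.2)
          else if yc.2 = '^' then (acc.1, PySem.Set.add acc.2 (xl.1, yc.1))
          else acc) acc) a
      = (lastOf (startsAll L) a.1, PySem.Set.update a.2 (capsAll L)) := by
  induction L generalizing a with
  | nil => simp [startsAll, capsAll, lastOf, PySem.Set.update]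
  | cons xl L ih =>
    rw [List.foldl_cons, inner_parse, ih]
    simp only [startsAll, capsAll, List.flatMap_cons, lastOf, List.foldl_append,
      PySem.Set.update]

theorem lastOf_or {α : Type} (l : List α) (a : Option α) : lastOf l a = l.getLast?.or a := by
  induction l generalizing a with
  | nil => simp [lastOf]
  | cons p t ih =>
    show lastOf t (some p) = _
    rw [ih]
    cases t with
    | nil => simp
    | cons q u => rw [List.getLast?_cons_cons]; cases h : (q :: u).getLast? <;> simp_all

theorem lastOf_eq_pyGet (l : List (Int × Int)) :
    PySem.List.pyGet? l (-1) = lastOf l none := by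
  rw [lastOf_or]
  cases l with
  | nil => simp [PySem.List.pyGet?, PySem.List.pyIdx?]
  | cons p t =>
    simp [PySem.List.pyGet?, PySem.List.pyIdx?]
    rw [List.getLast?_eq_getElem?, List.getElem?_eq_getElem (by simp)]
    congr 1

theorem W_map_replace (g : Int → Int) (k v w : Int) (l : List (Int × Int))
    (hnd : (l.map Prod.fst).Nodup) (h : (k, w) ∈ l) :
    W (l.map (fun p => if p.1 == k then (k, v) else p)) g = W l g - w * g k + v * g k := by
  induction l with
  | nil => simp at h
  | cons p t ih =>
    simp only [List.map_cons, List.nodup_cons] at hnd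
    rcases List.mem_cons.mp h with hp | hp
    · subst hp
      have htm : List.map (fun p => if p.1 == k then (k, v) else p) t = t := by
        conv_rhs => rw [← List.map_id t]
        exact List.map_congr_left (fun q hq => by
          rw [if_neg]
          · rfl
          · simp only [beq_iff_eq]
            exact fun hqk => hnd.1 (List.mem_map.mpr ⟨q, hq, hqk⟩))
      rw [List.map_cons, htm]
      simp [W]
      ring
    · have hpk : (p.1 == k) = false := by
        simp only [beq_eq_false_iff_ne, ne_eq]
        intro hpk
        exact hnd.1 (List.mem_map.mpr ⟨(k, w), hp, by simp [hpk]⟩)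
      rw [List.map_cons, hpk]
      simp only [Bool.false_eq_true, if_false, W, List.map_cons, List.sum_cons]
      have := ih hnd.2 hp
      simp only [W] at this
      rw [this]
      ring

theorem W_bump (d : PySem.Dict Int Int) (hd : d.keys.Nodup) (k c : Int) (g : Int → Int) :
    W (bump d k c).items g = W d.items g + c * g k := by
  unfold bump
  by_cases hc : d.contains k = true
  · obtain ⟨v, hv⟩ : ∃ v, d.get? k = some v := by
      cases hg : d.get? k with
      | none => rw [PySem.Dict.contains_eq_isSome_get?, hg] at hc; simp at hc
      | some v => exact ⟨v, rfl⟩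
    have hmem : (k, v) ∈ d.items := PySem.Dict.mem_items_of_get?_eq_some d hv
    rw [PySem.Dict.items_insert_of_contains d _ hc,
        W_map_replace g k _ v d.items hd hmem,
        PySem.Dict.getD_of_get?_eq_some d 0 hv]
    ring
  · rw [PySem.Dict.items_insert_of_not_contains d _ (by simpa using hc),
        PySem.Dict.getD_of_not_contains d 0 (by simpa using hc)]
    simp [W]

theorem nodup_bump (d : PySem.Dict Int Int) (hd : d.keys.Nodup) (k c : Int) :
    (bump d k c).keys.Nodup := PySem.Dict.nodup_keys_insert _ _ _ hd

theorem nodup_stepRow (spl : PySem.Set (Int × Int)) (x : Int) (l : List (Int × Int))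
    (nxt : PySem.Dict Int Int) (h : nxt.keys.Nodup) :
    (l.foldl (fun nxt yc =>
        if PySem.Set.contains spl (x, yc.1) then bump (bump nxt (yc.1 - 1) yc.2) (yc.1 + 1) yc.2
        else bump nxt yc.1 yc.2) nxt).keys.Nodup := by
  induction l generalizing nxt with
  | nil => exact h
  | cons yc l ih =>
    rw [List.foldl_cons]
    by_cases hs : PySem.Set.contains spl (x, yc.1) = true
    · rw [if_pos hs]; exact ih _ (nodup_bump _ (nodup_bump _ h _ _) _ _)
    · rw [if_neg (by simpa using hs)]; exact ih _ (nodup_bump _ h _ _)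

theorem stepRow_weight (spl : PySem.Set (Int × Int)) (x : Int) (l : List (Int × Int))
    (nxt : PySem.Dict Int Int) (h : nxt.keys.Nodup) (g : Int → Int) :
    W (l.foldl (fun nxt yc =>
        if PySem.Set.contains spl (x, yc.1) then bump (bump nxt (yc.1 - 1) yc.2) (yc.1 + 1) yc.2
        else bump nxt yc.1 yc.2) nxt).items g
      = W nxt.items g
        + W l (fun y => if PySem.Set.contains spl (x, y) then g (y - 1) + g (y + 1) else g y) := by
  induction l generalizing nxt with
  | nil => simp [W]
  | cons yc l ih =>
    rw [List.foldl_cons]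
    by_cases hs : PySem.Set.contains spl (x, yc.1) = true
    · rw [if_pos hs, ih _ (nodup_bump _ (nodup_bump _ h _ _) _ _),
          W_bump _ (nodup_bump _ h _ _), W_bump _ h]
      simp only [W, List.map_cons, List.sum_cons, hs, if_pos]
      ring
    · rw [if_neg (by simpa using hs), ih _ (nodup_bump _ h _ _), W_bump _ h]
      simp only [W, List.map_cons, List.sum_cons, Bool.not_eq_true] at *
      rw [if_neg (by simpa using hs)]
      ring

theorem loop_weight (spl : PySem.Set (Int × Int)) (maxX : Int) :
    ∀ (f : Nat) (x : Int) (d : PySem.Dict Int Int), d.keys.Nodup →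
      ((loopB spl maxX f x d).values).sum = W d.items (fun y => recA spl maxX f x y) := by
  intro f
  induction f with
  | zero =>
    intro x d _
    show (d.items.map Prod.snd).sum = _
    simp [W, recA]
  | succ f ih =>
    intro x d hd
    by_cases hx : x ≤ maxX
    · rw [show loopB spl maxX (f + 1) x d = loopB spl maxX f (x + 1) (stepRow spl x d) from by
        rw [loopB, if_pos hx]]
      have hnd : (stepRow spl x d).keys.Nodup := by
        unfold stepRow; exact nodup_stepRow spl x d.items PySem.Dict.empty (by simp)
      rw [ih (x + 1) (stepRow spl x d) hnd]
      unfold stepRow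
      rw [stepRow_weight spl x d.items PySem.Dict.empty (by simp)]
      have : ∀ y, recA spl maxX (f + 1) x y
          = if PySem.Set.contains spl (x, y) then
              recA spl maxX f (x + 1) (y - 1) + recA spl maxX f (x + 1) (y + 1)
            else recA spl maxX f (x + 1) y := by
        intro y
        rw [recA, if_neg (by omega)]
      simp only [W, this]
      simp [PySem.Dict.empty]
    · rw [show loopB spl maxX (f + 1) x d = d from by rw [loopB, if_neg hx]]
      show (d.items.map Prod.snd).sum = _
      have : ∀ y, recA spl maxX (f + 1) x y = 1 := by
        intro y
        rw [recA, if_pos (by omega)]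
      simp [W, this]

theorem mem_gives_ne_nil (input : List String) (c : Char)
    (h : ∃ s ∈ input, c ∈ s.toList) :
    (PySem.List.enumerate input 0).flatMap
      (fun xl => ((PySem.List.enumerate xl.2.toList 0).filter (fun yc => yc.2 = c)).map
        (fun yc => (xl.1, yc.1))) ≠ [] := by
  obtain ⟨s, hs, hc⟩ := h
  obtain ⟨k, hk, hsk⟩ := List.mem_iff_getElem.mp hs
  intro hnil
  rw [List.flatMap_eq_nil_iff] at hnil
  have hmem : ((0 : Int) + k, s) ∈ PySem.List.enumerate input 0 := by
    rw [PySem.List.mem_enumerate_iff]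
    exact ⟨k, hk, by rw [hsk]⟩
  have := hnil _ hmem
  rw [List.map_eq_nil_iff, List.filter_eq_nil_iff] at this
  obtain ⟨yc, hyc, hyc2⟩ : ∃ yc ∈ PySem.List.enumerate s.toList 0, yc.2 = c := by
    have : c ∈ (PySem.List.enumerate s.toList 0).map (fun p => p.2) := by
      rw [PySem.List.map_snd_enumerate]; exact hc
    obtain ⟨yc, hyc, hyce⟩ := List.mem_map.mp this
    exact ⟨yc, hyc, hyce⟩
  exact this yc hyc (by simpa using hyc2)

-- ===== VERDICT (by name: the statement is the Claim_ definition above) =====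
theorem solve_spec : Claim_equal_solve := by
  intro input _ hPre
  unfold Spec_solve solve solve_alt
  dsimp only
  rw [outer_parse, lastOf_eq_pyGet]
  simp only [startsAll, capsAll, sList, cList, PySem.Set.update_empty]
  cases hst : lastOf ((PySem.List.enumerate input 0).flatMap
      (fun xl => ((PySem.List.enumerate xl.2.toList 0).filter (fun yc => yc.2 = 'S')).map
        (fun yc => (xl.1, yc.1)))) none with
  | none =>
    exfalso
    rw [lastOf_or, Option.or_none, List.getLast?_eq_none_iff] at hst
    exact mem_gives_ne_nil input 'S' hPre.1 hst
  | some start =>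
    cases hmx : PySem.List.max?
        ((PySem.Set.ofList ((PySem.List.enumerate input 0).flatMap
          (fun xl => ((PySem.List.enumerate xl.2.toList 0).filter (fun yc => yc.2 = '^')).map
            (fun yc => (xl.1, yc.1))))).map (fun p => p.1)) (fun v => v) with
    | none =>
      exfalso
      rw [PySem.List.max?_eq_none_iff, List.map_eq_nil_iff] at hmx
      have hcaps := mem_gives_ne_nil input '^' hPre.2
      rcases h : (PySem.List.enumerate input 0).flatMap
          (fun xl => ((PySem.List.enumerate xl.2.toList 0).filter (fun yc => yc.2 = '^')).map
            (fun yc => (xl.1, yc.1))) with _ | ⟨p, t⟩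
      · exact hcaps h
      · rw [h, PySem.Set.ofList_cons] at hmx
        simp at hmx
    | some maxX =>
      dsimp only
      rw [loop_weight _ _ _ _ _ (PySem.Dict.nodup_keys_insert _ _ _ (by simp))]
      have hitems : (PySem.Dict.empty.insert start.2 (1 : Int)).items = [(start.2, 1)] := by
        rw [PySem.Dict.items_insert_of_not_contains _ _ (by simp)]
        simp [PySem.Dict.empty]
      rw [hitems]
      simp [W]
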